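-- pv_equiv track=rewrite | github.com/quaiion/van-ginneken | SegmentsMaker.py | RestoreKeyPoints
-- ===== SOURCE A (Python) =====
-- def RestoreKeyPoints(points):
--     if len(points) < 1:
--         return [points[0], points[0]]
--
--     key_points = [points[0]]  # Всегда включаем первую точку
--     prev_direction = None
--
--     for i in range(1, len(points)):
--         current = points[i]
--         prev = points[i-1]
--
--         # Проверка целочисленности координат
--         if not all(isinstance(c, int) for p in [prev, current] for c in p):
--             raise ValueError("Все координаты должны быть целыми числами")
--
--         dx = current[0] - prev[0]
--         dy = current[1] - prev[1]
--
--         # Проверка на диагональное движение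
--         if dx != 0 and dy != 0:
--             raise ValueError(f"Диагональное движение между {prev} и {current}")
--
--         # Определение текущего направления
--         current_direction = 'vertical' if dx == 0 else 'horizontal'
--
--         # Если направление изменилось - добавляем предыдущую точку
--         if prev_direction and current_direction != prev_direction:
--             key_points.append(prev)
--
--         prev_direction = current_direction
--
--     # Всегда добавляем последнюю точку
--     key_points.append(points[-1])
--
--     return key_points
-- ===== SOURCE B (Python) =====
-- def RestoreKeyPoints(points):
--     if len(points) < 1:
--         return [points[0], points[0]]
--
--     # Pass 1: validate each segment (same per-segment order and messages as the
--     # original) and record its direction.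
--     directions = []
--     for i in range(1, len(points)):
--         prev = points[i - 1]
--         current = points[i]
--         if not all(isinstance(c, int) for p in [prev, current] for c in p):
--             raise ValueError("Все координаты должны быть целыми числами")
--         dx = current[0] - prev[0]
--         dy = current[1] - prev[1]
--         if dx != 0 and dy != 0:
--             raise ValueError(f"Диагональное движение между {prev} и {current}")
--         directions.append('vertical' if dx == 0 else 'horizontal')
--
--     # Pass 2: a point is a corner exactly where the direction table changes.
--     key_points = [points[0]]
--     for j in range(1, len(directions)):
--         if directions[j] != directions[j - 1]:
--             key_points.append(points[j])
--     key_points.append(points[-1])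
--     return key_points
-- ===== Notes on version B (the rewrite author's own statement) =====
-- stated objective: alternative
-- what changed: Replaces A's single fused scan carrying a prev_direction state variable with a two-pass decomposition: first build a per-segment direction table (validating in the same per-segment order), then detect corners as the boundaries where adjacent table entries differ.
import Mathlib
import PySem

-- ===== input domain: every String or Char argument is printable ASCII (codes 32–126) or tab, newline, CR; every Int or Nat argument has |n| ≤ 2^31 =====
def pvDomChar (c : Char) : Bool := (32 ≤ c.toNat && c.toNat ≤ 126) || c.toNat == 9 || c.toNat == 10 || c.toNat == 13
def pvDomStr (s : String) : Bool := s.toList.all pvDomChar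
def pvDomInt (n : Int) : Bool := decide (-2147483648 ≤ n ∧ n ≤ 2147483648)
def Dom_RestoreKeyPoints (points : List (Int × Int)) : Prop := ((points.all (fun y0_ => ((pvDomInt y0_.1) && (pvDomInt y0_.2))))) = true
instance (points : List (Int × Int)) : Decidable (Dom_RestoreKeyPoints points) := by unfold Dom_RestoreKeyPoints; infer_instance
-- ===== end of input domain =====

-- B replaces A's fused scan (prev_direction state) by a direction table plus a boundary-detection pass; same cost.

-- ===== PORT A =====
-- Raise paths (IndexError on the empty list, ValueError on a diagonal segment) are excluded by
-- Pre_RestoreKeyPoints; on those inputs the port just returns the straight-line computation.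
-- The isinstance check is identically true for Int × Int arguments.
def RestoreKeyPoints (points : List (Int × Int)) : List (Int × Int) :=
  if points.length < 1 then []
  else
    let st := (PySem.List.pyRange 1 (points.length) 1).foldl
      (fun (st : List (Int × Int) × Option String) i =>
        let current := PySem.List.pyGetD points i (0, 0)
        let prev := PySem.List.pyGetD points (i - 1) (0, 0)
        let dx := current.1 - prev.1
        let currentDirection := if dx = 0 then "vertical" else "horizontal"
        let keyPoints :=
          match st.2 with
          | some pd => if currentDirection ≠ pd then st.1 ++ [prev] else st.1
          | none => st.1
        (keyPoints, some currentDirection))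
      ([PySem.List.pyGetD points 0 (0, 0)], none)
    st.1 ++ [PySem.List.pyGetD points (-1) (0, 0)]

-- ===== PORT B =====
def RestoreKeyPoints_alt (points : List (Int × Int)) : List (Int × Int) :=
  if points.length < 1 then []
  else
    let dirs := (PySem.List.pyRange 1 (points.length) 1).foldl
      (fun (ds : List String) i =>
        let prev := PySem.List.pyGetD points (i - 1) (0, 0)
        let current := PySem.List.pyGetD points i (0, 0)
        let dx := current.1 - prev.1
        ds ++ [if dx = 0 then "vertical" else "horizontal"])
      []
    let keyPoints := (PySem.List.pyRange 1 ((dirs.length : Int)) 1).foldl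
      (fun (kp : List (Int × Int)) j =>
        if PySem.List.pyGetD dirs j "" ≠ PySem.List.pyGetD dirs (j - 1) "" then
          kp ++ [PySem.List.pyGetD points j (0, 0)]
        else kp)
      [PySem.List.pyGetD points 0 (0, 0)]
    keyPoints ++ [PySem.List.pyGetD points (-1) (0, 0)]

-- ===== PRECONDITION & SPEC =====
-- Pre_ excludes exactly the inputs where the Python raises: the empty list (IndexError)
-- and paths with a diagonal segment (ValueError).
def Pre_RestoreKeyPoints (points : List (Int × Int)) : Prop :=
  points ≠ [] ∧ List.IsChain (fun p q : Int × Int => p.1 = q.1 ∨ p.2 = q.2) points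
instance (points : List (Int × Int)) : Decidable (Pre_RestoreKeyPoints points) := by
  unfold Pre_RestoreKeyPoints; infer_instance
def pvWitness_RestoreKeyPoints : (List (Int × Int)) := [(0, 0), (0, 2), (3, 2)]

def Spec_RestoreKeyPoints (points : List (Int × Int)) (out : List (Int × Int)) : Prop := out = RestoreKeyPoints_alt points
instance (points : List (Int × Int)) (out : List (Int × Int)) : Decidable (Spec_RestoreKeyPoints points out) := by unfold Spec_RestoreKeyPoints; infer_instance

-- ===== CLAIM (what is proved, stated in full; the proofs are below) =====
def Claim_equal_RestoreKeyPoints : Prop := ∀ (points : List (Int × Int)), Dom_RestoreKeyPoints points → Pre_RestoreKeyPoints points → Spec_RestoreKeyPoints points (RestoreKeyPoints points)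


-- ===== LEMMAS AND PROOFS =====

-- points[i] (in range throughout, by the loop bounds)
def pvGet (points : List (Int × Int)) (i : Int) : Int × Int := PySem.List.pyGetD points i (0, 0)

-- the direction of the segment ending at index i
def pvDir (points : List (Int × Int)) (i : Int) : String :=
  if (pvGet points i).1 - (pvGet points (i - 1)).1 = 0 then "vertical" else "horizontal"

-- A's loop body, written with pvGet/pvDir (definitionally equal to the port's lambda)
def pvStepA (points : List (Int × Int)) (st : List (Int × Int) × Option String) (i : Int) :
    List (Int × Int) × Option String :=
  ((match st.2 with
    | some pd => if pvDir points i ≠ pd then st.1 ++ [pvGet points (i - 1)] else st.1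
    | none => st.1), some (pvDir points i))

-- B's second loop body after the direction table has been resolved to pvDir
def pvStepB (points : List (Int × Int)) (kp : List (Int × Int)) (j : Int) : List (Int × Int) :=
  if pvDir points (j + 1) ≠ pvDir points j then kp ++ [pvGet points j] else kp

lemma pvDirs_get (points : List (Int × Int)) (k : Int) (h0 : 0 ≤ k)
    (hk : k < (points.length : Int) - 1) :
    PySem.List.pyGetD ((PySem.List.pyRange 1 (points.length : Int) 1).map (pvDir points)) k ""
      = pvDir points (k + 1) := by
  obtain ⟨k', rfl⟩ : ∃ k' : Nat, k = (k' : Int) := ⟨k.toNat, (Int.toNat_of_nonneg h0).symm⟩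
  rw [PySem.List.pyGetD_natCast]
  have hlen : k' < ((PySem.List.pyRange 1 (points.length : Int) 1).map (pvDir points)).length := by
    simp [PySem.List.length_pyRange_one]; omega
  rw [List.getD_eq_getElem _ _ hlen, List.getElem_map, PySem.List.getElem_pyRange_one]
  rw [add_comm]

lemma pvMain (points : List (Int × Int)) (t : Nat) :
    (PySem.List.pyRange 1 (2 + (t : Int)) 1).foldl (pvStepA points) ([pvGet points 0], none)
      = ((PySem.List.pyRange 1 (1 + (t : Int)) 1).foldl (pvStepB points) [pvGet points 0],
         some (pvDir points (1 + (t : Int)))) := by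
  induction t with
  | zero =>
    norm_num
    rw [show (2:Int) = 1 + 1 by norm_num, PySem.List.pyRange_one_singleton]
    simp [pvStepA]
  | succ t ih =>
    have h1 : (2 + ((t + 1 : Nat) : Int)) = (2 + (t : Int)) + 1 := by push_cast; ring
    have h2 : (1 + ((t + 1 : Nat) : Int)) = (1 + (t : Int)) + 1 := by push_cast; ring
    rw [h1, h2, PySem.List.pyRange_one_succ_right (by omega : (1:Int) ≤ 2 + (t : Int)),
        PySem.List.pyRange_one_succ_right (by omega : (1:Int) ≤ 1 + (t : Int)),
        List.foldl_append, List.foldl_append, ih]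
    have e1 : (2 : Int) + (t : Int) - 1 = 1 + (t : Int) := by ring
    have e2 : (1 : Int) + (t : Int) + 1 = 2 + (t : Int) := by ring
    simp only [List.foldl_cons, List.foldl_nil, pvStepA, pvStepB, e1, e2]

lemma ports_eq (points : List (Int × Int)) :
    RestoreKeyPoints points = RestoreKeyPoints_alt points := by
  by_cases h : points.length < 1
  · simp [RestoreKeyPoints, RestoreKeyPoints_alt, h]
  · show (if points.length < 1 then [] else
        ((PySem.List.pyRange 1 (points.length : Int) 1).foldl (pvStepA points)
          ([pvGet points 0], none)).1 ++ [pvGet points (-1)])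
      = (if points.length < 1 then [] else
        (let dirs := (PySem.List.pyRange 1 (points.length : Int) 1).foldl
            (fun ds i => ds ++ [pvDir points i]) [];
         (PySem.List.pyRange 1 (dirs.length : Int) 1).foldl
            (fun kp j => if PySem.List.pyGetD dirs j "" ≠ PySem.List.pyGetD dirs (j - 1) ""
              then kp ++ [pvGet points j] else kp)
            [pvGet points 0]) ++ [pvGet points (-1)])
    rw [if_neg h, if_neg h]
    have hdirs : (PySem.List.pyRange 1 (points.length : Int) 1).foldl
        (fun ds i => ds ++ [pvDir points i]) []
        = (PySem.List.pyRange 1 (points.length : Int) 1).map (pvDir points) := by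
      simpa using PySem.List.foldl_append_singleton_eq_map (f := pvDir points)
        (l := PySem.List.pyRange 1 (points.length : Int) 1) (acc := [])
    simp only [hdirs]
    have hlen : ((((PySem.List.pyRange 1 (points.length : Int) 1).map (pvDir points)).length : Int))
        = (points.length : Int) - 1 := by
      simp [PySem.List.length_pyRange_one]
      omega
    rw [hlen]
    have hcong : (PySem.List.pyRange 1 ((points.length : Int) - 1) 1).foldl
        (fun kp j => if PySem.List.pyGetD
              ((PySem.List.pyRange 1 (points.length : Int) 1).map (pvDir points)) j ""
            ≠ PySem.List.pyGetD
              ((PySem.List.pyRange 1 (points.length : Int) 1).map (pvDir points)) (j - 1) ""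
            then kp ++ [pvGet points j] else kp)
          [pvGet points 0]
        = (PySem.List.pyRange 1 ((points.length : Int) - 1) 1).foldl (pvStepB points)
          [pvGet points 0] := by
      apply PySem.List.foldl_congr_mem
      intro kp j hj
      rw [PySem.List.mem_pyRange_one] at hj
      rw [pvDirs_get points j (by omega) (by omega),
          pvDirs_get points (j - 1) (by omega) (by omega)]
      simp only [pvStepB, sub_add_cancel]
    rw [hcong]
    by_cases h2 : points.length < 2
    · have hn : points.length = 1 := by omega
      simp [hn, PySem.List.pyRange_one_eq_nil]
    · obtain ⟨t, ht⟩ : ∃ t : Nat, points.length = 2 + t := ⟨points.length - 2, by omega⟩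
      have hA : ((points.length : Int)) = 2 + (t : Int) := by rw [ht]; push_cast; ring
      have hB : ((points.length : Int)) - 1 = 1 + (t : Int) := by rw [ht]; push_cast; ring
      rw [hB, hA, pvMain points t]

-- ===== VERDICT (by name: the statement is the Claim_ definition above) =====
theorem RestoreKeyPoints_spec : Claim_equal_RestoreKeyPoints := by
  intro points _ _
  unfold Spec_RestoreKeyPoints
  exact ports_eq points
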